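-- pv_equiv track=rewrite | github.com/sjhyun7057/Algorithm | 프로그래머스/unrated/150369. 택배 배달과 수거하기/택배 배달과 수거하기.py | solution
-- ===== SOURCE A (Python) =====
-- def solution(cap, n, deliveries, pickups):
--     pickups = pickups[::-1]
--     deliveries = deliveries[::-1]
--     answer = 0
--     deliver = 0; pickup = 0
--     for i in range(n):
--         deliver += deliveries[i]
--         pickup += pickups[i]
--
--         while deliver > 0 or pickup > 0: # 만약 deliver나 pickup이 cap보다 큰 경우 그 곳을 한번 더 방문
--             deliver -= cap
--             pickup -= cap
--             answer += (n-i) * 2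
--     return answer
-- ===== SOURCE B (Python) =====
-- def solution(cap, n, deliveries, pickups):
--     m = max(n, 0)
--     total = 0
--     deliver = 0
--     pickup = 0
--     dist = n
--     for d, p in zip(deliveries[::-1][:m], pickups[::-1][:m]):
--         deliver += d
--         pickup += p
--         trips = max(0, -(-deliver // cap), -(-pickup // cap))
--         total += trips * dist * 2
--         deliver -= trips * cap
--         pickup -= trips * cap
--         dist -= 1
--     return total
-- ===== Notes on version B (the rewrite author's own statement) =====
-- stated objective: alternative
-- what changed: Replaces A's inner while-loop, which subtracts cap once per truck trip, with a closed-form trip count per position via ceiling division, folding over the zipped reversed prefixes instead of index-looping over range(n).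
-- outside the precondition, e.g. on solution(-2, 1, [-3], [0]): A returns 0, B returns 4; on solution(3, 2, [1], [1]): A raises IndexError, B returns 4
import Mathlib
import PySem

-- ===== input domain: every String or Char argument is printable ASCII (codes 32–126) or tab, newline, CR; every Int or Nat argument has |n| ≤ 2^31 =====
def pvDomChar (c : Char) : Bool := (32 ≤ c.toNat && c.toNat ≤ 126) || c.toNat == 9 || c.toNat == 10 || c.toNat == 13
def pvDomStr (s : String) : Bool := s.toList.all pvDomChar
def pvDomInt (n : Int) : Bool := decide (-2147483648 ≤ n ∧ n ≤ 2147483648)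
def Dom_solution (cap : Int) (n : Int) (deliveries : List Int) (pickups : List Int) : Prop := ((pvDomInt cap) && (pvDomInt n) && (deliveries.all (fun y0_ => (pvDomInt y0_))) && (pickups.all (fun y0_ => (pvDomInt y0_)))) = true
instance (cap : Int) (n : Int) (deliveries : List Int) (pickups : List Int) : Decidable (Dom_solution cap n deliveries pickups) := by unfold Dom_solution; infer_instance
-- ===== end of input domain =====

-- B replaces A's inner while-loop (one decrement by cap per truck trip) with a closed-form
-- ceiling-division trip count per position, folding over the zipped reversed prefixes; an
-- alternative algorithm, equivalence claimed on Pre_ (positive cap, n within bounds).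

-- ===== PORT A =====
-- the 'while deliver > 0 or pickup > 0' loop; the outer 'if 0 < cap' is only a totality
-- guard (for cap ≤ 0 Python diverges whenever the loop is entered; Pre_ requires 0 < cap)
def whileA (cap : Int) (dist : Int) (deliver : Int) (pickup : Int) (answer : Int) : Int × Int × Int :=
  if 0 < cap then
    if deliver > 0 ∨ pickup > 0 then
      whileA cap dist (deliver - cap) (pickup - cap) (answer + dist * 2)
    else (deliver, pickup, answer)
  else (deliver, pickup, answer)
termination_by (max deliver pickup).toNat
decreasing_by omega

def solution (cap : Int) (n : Int) (deliveries : List Int) (pickups : List Int) : Int :=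
  ((PySem.List.pyRange 0 n 1).foldl
    (fun (st : Int × Int × Int) i =>
      whileA cap (n - i)
        (st.1 + PySem.List.pyGetD deliveries.reverse i 0)
        (st.2.1 + PySem.List.pyGetD pickups.reverse i 0)
        st.2.2)
    (0, 0, 0)).2.2

-- ===== PORT B =====
def bTrips (cap : Int) (deliver : Int) (pickup : Int) : Int :=
  max 0 (max (-(PySem.Int.floordiv (-deliver) cap)) (-(PySem.Int.floordiv (-pickup) cap)))

-- state: (total, deliver, pickup, dist)
def bStep (cap : Int) (st : Int × Int × Int × Int) (dp : Int × Int) : Int × Int × Int × Int :=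
  let deliver := st.2.1 + dp.1
  let pickup := st.2.2.1 + dp.2
  let dist := st.2.2.2
  let trips := bTrips cap deliver pickup
  (st.1 + trips * dist * 2, deliver - trips * cap, pickup - trips * cap, dist - 1)

def solution_alt (cap : Int) (n : Int) (deliveries : List Int) (pickups : List Int) : Int :=
  let m := (max n 0).toNat
  ((List.zip (deliveries.reverse.take m) (pickups.reverse.take m)).foldl
    (bStep cap) (0, 0, 0, n)).1

-- ===== PRECONDITION & SPEC =====
-- Pre_ excludes nonpositive cap — there Python A loops forever as soon as an accumulated load is
-- positive, and where it happens to return, the 0 is an accident of the loop never firing — and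
-- n greater than a list length, where A raises IndexError.
def Pre_solution (cap : Int) (n : Int) (deliveries : List Int) (pickups : List Int) : Prop :=
  0 < cap ∧ n ≤ (deliveries.length : Int) ∧ n ≤ (pickups.length : Int)
instance (cap : Int) (n : Int) (deliveries : List Int) (pickups : List Int) : Decidable (Pre_solution cap n deliveries pickups) := by unfold Pre_solution; infer_instance

def pvWitness_solution : Int × Int × List Int × List Int := (4, 5, [1, 0, 3, 1, 2], [0, 3, 0, 4, 0])

def Spec_solution (cap : Int) (n : Int) (deliveries : List Int) (pickups : List Int) (out : Int) : Prop := out = solution_alt cap n deliveries pickups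
instance (cap : Int) (n : Int) (deliveries : List Int) (pickups : List Int) (out : Int) : Decidable (Spec_solution cap n deliveries pickups out) := by unfold Spec_solution; infer_instance

-- ===== CLAIM (what is proved, stated in full; the proofs are below) =====
def Claim_equal_solution : Prop := ∀ (cap : Int) (n : Int) (deliveries : List Int) (pickups : List Int), Dom_solution cap n deliveries pickups → Pre_solution cap n deliveries pickups → Spec_solution cap n deliveries pickups (solution cap n deliveries pickups)

-- ===== LEMMAS AND PROOFS =====

-- ceiling-division bracket: -((-x) // c) ≤ k ↔ x ≤ k·c   (c > 0)
theorem cdiv_le_iff (cap x k : Int) (hc : 0 < cap) :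
    -(PySem.Int.floordiv (-x) cap) ≤ k ↔ x ≤ k * cap := by
  rw [neg_le, PySem.Int.le_floordiv_iff_mul_le hc]
  constructor <;> intro h <;> nlinarith

theorem bTrips_zero (cap d p : Int) (hc : 0 < cap) (hd : d ≤ 0) (hp : p ≤ 0) :
    bTrips cap d p = 0 := by
  have h1 := (cdiv_le_iff cap d 0 hc).2 (by omega)
  have h2 := (cdiv_le_iff cap p 0 hc).2 (by omega)
  unfold bTrips; omega

theorem bTrips_succ (cap d p : Int) (hc : 0 < cap) (h : 0 < d ∨ 0 < p) :
    bTrips cap d p = bTrips cap (d - cap) (p - cap) + 1 := by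
  have e1 : ∀ x : Int, -(PySem.Int.floordiv (-(x - cap)) cap) = -(PySem.Int.floordiv (-x) cap) - 1 := by
    intro x
    have hxe : -(x - cap) = -x + 1 * cap := by ring
    rw [hxe, PySem.Int.floordiv_eq_ediv_of_pos hc, PySem.Int.floordiv_eq_ediv_of_pos hc,
      Int.add_mul_ediv_right _ _ (by omega : cap ≠ 0)]
    ring
  have pos1 : 0 < d → 1 ≤ -(PySem.Int.floordiv (-d) cap) := by
    intro hd
    by_contra hcon
    have := (cdiv_le_iff cap d 0 hc).1 (by omega)
    omega
  have pos2 : 0 < p → 1 ≤ -(PySem.Int.floordiv (-p) cap) := by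
    intro hp
    by_contra hcon
    have := (cdiv_le_iff cap p 0 hc).1 (by omega)
    omega
  unfold bTrips
  rw [e1 d, e1 p]
  rcases h with hd | hp
  · have := pos1 hd; omega
  · have := pos2 hp; omega


-- A's while-loop computed in closed form by B's trip count
theorem whileA_eq (cap dist : Int) (hc : 0 < cap) :
    ∀ d p a, whileA cap dist d p a =
      (d - bTrips cap d p * cap, p - bTrips cap d p * cap, a + bTrips cap d p * dist * 2) := by
  intro d p a
  fun_induction whileA cap dist d p a with
  | case1 d p a _ hcond ih =>
    rw [ih, bTrips_succ cap d p hc hcond]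
    refine Prod.ext (by ring) (Prod.ext (by ring) (by ring))
  | case2 d p a _ hcond =>
    have hno := not_or.1 hcond
    rw [bTrips_zero cap d p hc (by omega) (by omega)]
    simp
  | case3 d p a hcap => omega

-- the two folds agree, generalized over the remaining suffix
theorem fold_bridge (cap n : Int) (ds ps : List Int) (hc : 0 < cap) :
    ∀ (k : Nat) (i : Int), 0 ≤ i → i + k = n →
      i.toNat + k ≤ ds.length → i.toNat + k ≤ ps.length →
      ∀ d p a,
      ((PySem.List.pyRange i n 1).foldl
        (fun (st : Int × Int × Int) j =>
          whileA cap (n - j)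
            (st.1 + PySem.List.pyGetD ds j 0)
            (st.2.1 + PySem.List.pyGetD ps j 0)
            st.2.2)
        (d, p, a)).2.2
      = (((List.zip (ds.drop i.toNat) (ps.drop i.toNat)).take k).foldl
          (bStep cap) (a, d, p, n - i)).1 := by
  intro k
  induction k with
  | zero =>
    intro i hi hik _ _ d p a
    rw [PySem.List.pyRange_one_eq_nil (by omega)]
    simp
  | succ k ih =>
    intro i hi hik hd hp d p a
    have hilt : i.toNat < ds.length := by omega
    have hilt' : i.toNat < ps.length := by omega
    rw [PySem.List.pyRange_one_cons (by omega)]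
    rw [List.drop_eq_getElem_cons hilt, List.drop_eq_getElem_cons hilt']
    simp only [List.zip_cons_cons, List.take_succ_cons, List.foldl_cons]
    have hgd : PySem.List.pyGetD ds i 0 = ds[i.toNat] :=
      PySem.List.pyGetD_eq_getElem ds 0 hi (by omega)
    have hgp : PySem.List.pyGetD ps i 0 = ps[i.toNat] :=
      PySem.List.pyGetD_eq_getElem ps 0 hi (by omega)
    have hstep :
        whileA cap (n - i) (d + PySem.List.pyGetD ds i 0) (p + PySem.List.pyGetD ps i 0) a
          = (let st := bStep cap (a, d, p, n - i) (ds[i.toNat], ps[i.toNat])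
             (st.2.1, st.2.2.1, st.1)) := by
      rw [hgd, hgp, whileA_eq cap (n - i) hc]
      simp only [bStep, bTrips]
    rw [hstep]
    have hnext := ih (i + 1) (by omega) (by omega) (by omega) (by omega)
    have htn : (i + 1).toNat = i.toNat + 1 := by omega
    rw [htn] at hnext
    rw [hnext]
    have hbd : ((bStep cap (a, d, p, n - i) (ds[i.toNat], ps[i.toNat])).1,
        (bStep cap (a, d, p, n - i) (ds[i.toNat], ps[i.toNat])).2.1,
        (bStep cap (a, d, p, n - i) (ds[i.toNat], ps[i.toNat])).2.2.1, n - (i + 1))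
          = bStep cap (a, d, p, n - i) (ds[i.toNat], ps[i.toNat]) := by
      simp only [bStep]
      exact Prod.ext rfl (Prod.ext rfl (Prod.ext rfl (by ring)))
    rw [hbd]

theorem zip_take_eq (xs ys : List Int) (n : Nat) :
    (List.zip (xs.take n) (ys.take n)) = (List.zip xs ys).take n := by
  induction xs generalizing ys n with
  | nil => simp
  | cons x xs ih => cases ys <;> cases n <;> simp [ih]

-- ===== VERDICT (by name: the statement is the Claim_ definition above) =====
theorem solution_spec : Claim_equal_solution := by
  intro cap n deliveries pickups _ hpre
  obtain ⟨hc, hd, hp⟩ := hpre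
  unfold Spec_solution solution solution_alt
  by_cases hn : n ≤ 0
  · rw [PySem.List.pyRange_one_eq_nil (by omega)]
    have : (max n 0).toNat = 0 := by omega
    simp [this]
  · replace hn : 0 < n := by omega
    have hm : (max n 0).toNat = n.toNat := by omega
    have := fold_bridge cap n deliveries.reverse pickups.reverse hc n.toNat 0
      (by omega) (by omega) (by simp; omega) (by simp; omega) 0 0 0
    simp only [Int.toNat_zero, List.drop_zero, sub_zero] at this
    rw [this]
    simp only [hm, zip_take_eq]
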